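-- pv_equiv track=rewrite | github.com/HakimIqbal/Auto-survey | generate_google_form_like_summary.py | _long_context
-- ===== SOURCE A (Python) =====
-- from typing import Dict, List, Literal, Optional, Sequence, Tuple, TypedDict
--
-- LONG_TEXT_CONTEXT_KEYS = [1, 3, 5, 7, 8, 17, 20, 21, 22, 23, 24]
--
-- def _long_context(row_context: Optional[Dict[str, object]]) -> Dict[str, object]:
--     if not row_context:
--         return {}
--     highlights = {}
--     for qid in LONG_TEXT_CONTEXT_KEYS:
--         key = f"Q{qid}"
--         if key in row_context:
--             highlights[key] = row_context[key]
--     return {"highlights": highlights} if highlights else {}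
-- ===== SOURCE B (Python) =====
-- LONG_TEXT_CONTEXT_KEYS = [1, 3, 5, 7, 8, 17, 20, 21, 22, 23, 24]
-- ALLOWED = {f"Q{q}" for q in LONG_TEXT_CONTEXT_KEYS}
--
-- def _long_context(row_context):
--     if not row_context:
--         return {}
--     hits = [(k, v) for k, v in row_context.items() if k in ALLOWED]
--     hits.sort(key=lambda kv: int(kv[0][1:]))
--     highlights = dict(hits)
--     return {"highlights": highlights} if highlights else {}
-- ===== Notes on version B (the rewrite author's own statement) =====
-- stated objective: alternative
-- what changed: Instead of scanning the fixed key list and probing the dict per key, B scans the context's items once, filters them through a precomputed ALLOWED set, and sorts the hits by their numeric question id (the fixed key list is ascending, so the result order matches A exactly).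
import Mathlib
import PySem

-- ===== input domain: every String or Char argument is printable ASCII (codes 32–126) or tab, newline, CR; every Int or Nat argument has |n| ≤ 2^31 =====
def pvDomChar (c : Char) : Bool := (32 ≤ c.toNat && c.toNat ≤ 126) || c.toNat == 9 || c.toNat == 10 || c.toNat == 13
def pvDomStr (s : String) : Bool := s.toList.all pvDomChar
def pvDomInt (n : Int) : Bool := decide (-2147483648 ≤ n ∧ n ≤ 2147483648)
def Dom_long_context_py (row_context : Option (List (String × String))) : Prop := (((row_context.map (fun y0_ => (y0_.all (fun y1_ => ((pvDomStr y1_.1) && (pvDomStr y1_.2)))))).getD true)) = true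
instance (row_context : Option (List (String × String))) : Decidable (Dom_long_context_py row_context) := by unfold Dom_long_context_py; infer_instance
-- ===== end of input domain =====

-- B scans the context items once against a precomputed ALLOWED set and sorts the hits by
-- numeric question id, instead of A's probe of the dict per fixed key; return values agree.

-- ===== PORT A =====
def LONG_TEXT_CONTEXT_KEYS : List Int := [1, 3, 5, 7, 8, 17, 20, 21, 22, 23, 24]

-- f"Q{qid}" built at character level (String append is kernel-opaque); exact for str of an int
def qkey (q : Int) : String := String.ofList ('Q' :: PySem.Int.toChars q)

def long_context_py (row_context : Option (List (String × String))) : List (String × List (String × String)) :=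
  match row_context with
  | none => []                                  -- `if not row_context` (None case)
  | some d =>
    if d.isEmpty then []                        -- `if not row_context` (empty dict case)
    else
      let highlights := LONG_TEXT_CONTEXT_KEYS.foldl
        (fun h qid =>
          match (PySem.Dict.mk d).get? (qkey qid) with   -- `if key in row_context: … row_context[key]`
          | some v => h.insert (qkey qid) v
          | none => h)
        PySem.Dict.empty
      if highlights.items.isEmpty then [] else [("highlights", highlights.items)]

-- ===== PORT B =====
def ALLOWED : PySem.Set String := PySem.Set.ofList (LONG_TEXT_CONTEXT_KEYS.map qkey)

-- sort key int(kv[0][1:]); the .getD 0 is unreachable in Source B: every key that reaches the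
-- sort was filtered through ALLOWED, so kv[0][1:] is the decimal digits of its qid
def bkey (kv : String × String) : Int := (PySem.Int.ofChars? (kv.1.toList.drop 1)).getD 0

def long_context_py_alt (row_context : Option (List (String × String))) : List (String × List (String × String)) :=
  match row_context with
  | none => []
  | some d =>
    if d.isEmpty then []
    else
      let hits := d.filter (fun kv => PySem.Set.contains ALLOWED kv.1)
      let hits := PySem.List.sorted hits bkey
      let highlights := PySem.Dict.ofList hits
      if highlights.items.isEmpty then [] else [("highlights", highlights.items)]

-- ===== PRECONDITION & SPEC =====
-- Pre_ only states the Python-dict invariant of the association-list encoding: the keys of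
-- row_context are distinct (a Python dict can never carry duplicate keys).
def Pre_long_context_py (row_context : Option (List (String × String))) : Prop :=
  ((row_context.getD []).map Prod.fst).Nodup
instance (row_context : Option (List (String × String))) : Decidable (Pre_long_context_py row_context) := by unfold Pre_long_context_py; infer_instance

def pvWitness_long_context_py : (Option (List (String × String))) := some [("Q3", "yes"), ("Q1", "no"), ("extra", "x")]

def Spec_long_context_py (row_context : Option (List (String × String))) (out : List (String × List (String × String))) : Prop := out = long_context_py_alt row_context
instance (row_context : Option (List (String × String))) (out : List (String × List (String × String))) : Decidable (Spec_long_context_py row_context out) := by unfold Spec_long_context_py; infer_instance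

-- ===== CLAIM (what is proved, stated in full; the proofs are below) =====
def Claim_equal_long_context_py : Prop := ∀ (row_context : Option (List (String × String))), Dom_long_context_py row_context → Pre_long_context_py row_context → Spec_long_context_py row_context (long_context_py row_context)

-- ===== LEMMAS AND PROOFS =====

-- the presence test A makes, as a Bool on qids
def presIn (d : List (String × String)) (q : Int) : Bool := (PySem.Dict.mk d).contains (qkey q)

-- the list A's loop accumulates, described directly
def targetList (d : List (String × String)) : List (String × String) :=
  (LONG_TEXT_CONTEXT_KEYS.filter (presIn d)).map
    (fun q => (qkey q, ((PySem.Dict.mk d).get? (qkey q)).getD ""))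

lemma nodup_qkeys : (LONG_TEXT_CONTEXT_KEYS.map qkey).Nodup := by decide

lemma parse_qkey : ∀ q ∈ LONG_TEXT_CONTEXT_KEYS,
    (PySem.Int.ofChars? ((qkey q).toList.drop 1)).getD 0 = q := by decide

lemma bkey_qkey {q : Int} (hq : q ∈ LONG_TEXT_CONTEXT_KEYS) (v : String) :
    bkey (qkey q, v) = q := parse_qkey q hq

lemma keys_lt : LONG_TEXT_CONTEXT_KEYS.Pairwise (· < ·) := by decide

lemma nodup_filter_qkeys (d : List (String × String)) :
    ((LONG_TEXT_CONTEXT_KEYS.filter (presIn d)).map qkey).Nodup :=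
  nodup_qkeys.sublist ((List.filter_sublist (l := LONG_TEXT_CONTEXT_KEYS) (p := presIn d)).map qkey)

lemma A_items (d : List (String × String)) :
    (LONG_TEXT_CONTEXT_KEYS.foldl
      (fun h qid =>
        match (PySem.Dict.mk d).get? (qkey qid) with
        | some v => h.insert (qkey qid) v
        | none => h)
      PySem.Dict.empty).items = targetList d := by
  have hstep : (fun (h : PySem.Dict String String) qid =>
      match (PySem.Dict.mk d).get? (qkey qid) with
      | some v => h.insert (qkey qid) v
      | none => h)
      = (fun (h : PySem.Dict String String) qid =>
          if presIn d qid then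
            h.insert (qkey qid) (((PySem.Dict.mk d).get? (qkey qid)).getD "") else h) := by
    funext h qid
    unfold presIn
    rw [PySem.Dict.contains_eq_isSome_get?]
    cases (PySem.Dict.mk d).get? (qkey qid) <;> simp
  rw [hstep, ← List.foldl_filter]
  have := PySem.Dict.items_foldl_insert_fresh
    (LONG_TEXT_CONTEXT_KEYS.filter (presIn d)) qkey
    (fun q => ((PySem.Dict.mk d).get? (qkey q)).getD "") PySem.Dict.empty
    (fun a _ => PySem.Dict.contains_empty (qkey a)) (nodup_filter_qkeys d)
  simpa [targetList, PySem.Dict.empty] using this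

lemma map_fst_target (d : List (String × String)) :
    (targetList d).map Prod.fst = (LONG_TEXT_CONTEXT_KEYS.filter (presIn d)).map qkey := by
  simp [targetList, Function.comp]

lemma mem_target_iff (d : List (String × String)) (hnd : (d.map Prod.fst).Nodup)
    (kv : String × String) :
    kv ∈ targetList d ↔ kv ∈ d.filter (fun p => PySem.Set.contains ALLOWED p.1) := by
  have hkeys : (PySem.Dict.mk d).keys.Nodup := hnd
  have hallowed : ∀ k : String,
      PySem.Set.contains ALLOWED k = true ↔ ∃ q ∈ LONG_TEXT_CONTEXT_KEYS, qkey q = k := by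
    intro k
    simp only [ALLOWED, PySem.Set.contains, List.contains_iff_mem, PySem.Set.mem_ofList,
      List.mem_map]
  constructor
  · intro hm
    simp only [targetList, List.mem_map, List.mem_filter] at hm
    obtain ⟨q, ⟨hqmem, hpres⟩, hEq⟩ := hm
    unfold presIn at hpres
    rw [PySem.Dict.contains_eq_isSome_get?] at hpres
    obtain ⟨v, hv⟩ := Option.isSome_iff_exists.mp hpres
    have hmem : (qkey q, v) ∈ (PySem.Dict.mk d).items :=
      (PySem.Dict.get?_eq_some_iff_mem_items _ _ _ hkeys).mp hv
    rw [hv] at hEq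
    simp only [Option.getD_some] at hEq
    subst hEq
    refine List.mem_filter.mpr ⟨hmem, ?_⟩
    exact (hallowed _).mpr ⟨q, hqmem, rfl⟩
  · intro hm
    obtain ⟨hmemd, hall⟩ := List.mem_filter.mp hm
    obtain ⟨q, hqmem, hk⟩ := (hallowed _).mp hall
    have hget : (PySem.Dict.mk d).get? kv.1 = some kv.2 :=
      (PySem.Dict.get?_eq_some_iff_mem_items _ _ _ hkeys).mpr hmemd
    simp only [targetList, List.mem_map, List.mem_filter]
    refine ⟨q, ⟨hqmem, ?_⟩, ?_⟩
    · unfold presIn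
      rw [PySem.Dict.contains_eq_isSome_get?, hk, hget]
      rfl
    · rw [hk, hget]
      simp

lemma target_perm_hits (d : List (String × String)) (hnd : (d.map Prod.fst).Nodup) :
    (targetList d).Perm (d.filter (fun kv => PySem.Set.contains ALLOWED kv.1)) := by
  apply List.perm_of_nodup_nodup_toFinset_eq
  · exact ((map_fst_target d) ▸ nodup_filter_qkeys d).of_map
  · exact (hnd.of_map).filter _
  · ext kv
    simp only [List.mem_toFinset]
    exact mem_target_iff d hnd kv

lemma target_pairwise (d : List (String × String)) :
    (targetList d).Pairwise (fun a b => bkey a < bkey b) := by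
  unfold targetList
  rw [List.pairwise_map]
  refine List.Pairwise.imp_of_mem ?_ (keys_lt.filter (presIn d))
  intro a b ha hb hab
  rw [bkey_qkey (List.mem_of_mem_filter ha) _, bkey_qkey (List.mem_of_mem_filter hb) _]
  exact hab

lemma sorted_hits_eq (d : List (String × String)) (hnd : (d.map Prod.fst).Nodup) :
    PySem.List.sorted (d.filter (fun kv => PySem.Set.contains ALLOWED kv.1)) bkey = targetList d :=
  PySem.List.sorted_eq_of_perm_of_pairwise_lt _ _ _ (target_perm_hits d hnd) (target_pairwise d)

lemma ofList_target (d : List (String × String)) :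
    (PySem.Dict.ofList (targetList d)).items = targetList d := by
  have := PySem.Dict.items_foldl_insert_fresh (targetList d) Prod.fst Prod.snd PySem.Dict.empty
    (fun a _ => PySem.Dict.contains_empty a.1) ((map_fst_target d) ▸ nodup_filter_qkeys d)
  simpa [PySem.Dict.ofList, PySem.Dict.update, PySem.Dict.empty] using this

-- ===== VERDICT (by name: the statement is the Claim_ definition above) =====
theorem long_context_py_spec : Claim_equal_long_context_py := by
  intro rc _hdom hpre
  unfold Spec_long_context_py long_context_py long_context_py_alt
  match rc with
  | none => rfl
  | some d =>
    simp only [Pre_long_context_py, Option.getD_some] at hpre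
    by_cases hd : d.isEmpty
    · simp [hd]
    · simp only [hd, Bool.false_eq_true, ite_false]
      rw [A_items d, sorted_hits_eq d hpre, ofList_target d]
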